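-- pv_equiv track=rewrite | github.com/das61005/liver_segmentation | Reza_functions2.py | find_path_size
-- ===== SOURCE A (Python) =====
-- def find_path_size(path):
--     #slices = [nib.load(s).get_data() for s in g]
--     path_new=[(p.split('_'))[0] for p in path]
--     ID=[]
--     arc=0
--     for i,p in enumerate(path_new):
--         if i ==0:
--             ID.append(0)
--             arc=p
--             continue
--         if not arc==p:
--             ID.append(i-1)
--             ID.append(i)
--             arc=p
--     ID.append(len(path_new)-1)
--
--     return ID
-- ===== SOURCE B (Python) =====
-- def find_path_size(path):
--     pref = [p.split('_')[0] for p in path]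
--     # stage 1: run-length-encode the prefix list into (value, length) groups
--     runs = []
--     for k in pref:
--         if runs and runs[-1][0] == k:
--             runs[-1][1] += 1
--         else:
--             runs.append([k, 1])
--     # stage 2: prefix-sum the lengths into [start, end] spans and flatten them
--     out = []
--     start = 0
--     for _, ln in runs:
--         out.append(start)
--         out.append(start + ln - 1)
--         start += ln
--     return out
-- ===== Notes on version B (the rewrite author's own statement) =====
-- stated objective: alternative
-- what changed: Replaces A's single stateful scan that emits boundary indices on the fly (running 'arc' value, appending i-1,i at each change plus sentinel bookends) by two staged passes over a different intermediate structure: first a run-length encoding of the prefix list into (value,length) groups, then a prefix-sum pass turning the lengths into flattened [start,end] spans; no index is emitted during the scan.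
-- intended difference: On the empty list A returns the accidental sentinel [-1] (it unconditionally appends len-1 after its loop), while B returns [], the intended 'no runs, no boundaries' answer. — e.g. on find_path_size([]): A returns [-1], B returns []
import Mathlib
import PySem

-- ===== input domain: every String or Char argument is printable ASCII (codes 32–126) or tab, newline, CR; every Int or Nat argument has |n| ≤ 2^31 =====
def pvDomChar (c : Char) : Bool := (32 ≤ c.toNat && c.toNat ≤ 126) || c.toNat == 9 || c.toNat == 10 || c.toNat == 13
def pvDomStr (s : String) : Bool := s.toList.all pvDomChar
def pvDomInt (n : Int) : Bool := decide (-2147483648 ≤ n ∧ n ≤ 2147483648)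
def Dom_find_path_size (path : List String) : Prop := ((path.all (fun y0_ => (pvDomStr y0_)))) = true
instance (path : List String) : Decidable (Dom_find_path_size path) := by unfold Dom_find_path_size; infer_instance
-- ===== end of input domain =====

-- B replaces A's single on-the-fly boundary-emitting scan by two staged passes: a run-length
-- encoding of the prefix list, then a prefix-sum pass turning run lengths into flattened spans
-- (alternative decomposition, same cost); on the empty list A returns the accidental sentinel
-- [-1], B returns [] (stated as D_ below).

-- ===== PORT A =====
-- loop body of A; Python's initial 'arc = 0' (an int, never equal to any string prefix, and
-- overwritten on the i == 0 iteration before any comparison) is modelled by 'none'.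
def pvStepA (st : List Int × Option String) (ip : Int × String) : List Int × Option String :=
  if ip.1 = 0 then (st.1 ++ [0], some ip.2)
  else if ¬ (st.2 = some ip.2) then (st.1 ++ [ip.1 - 1, ip.1], some ip.2)
  else st

def find_path_size (path : List String) : List Int :=
  -- p.split('_')[0]: splitOn never returns [], so the [0] index cannot raise; headD's default is never used
  let path_new := path.map (fun p => ((PySem.Str.split? p "_").getD []).headD "")
  let r := (PySem.List.enumerate path_new 0).foldl pvStepA ([], none)
  r.1 ++ [(path_new.length : Int) - 1]

-- ===== PORT B =====
-- stage-1 loop body of Source B: Python's in-place 'runs[-1][1] += 1' on the last group becomes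
-- dropLast ++ [(q, c+1)]; 'runs.append([k, 1])' becomes ++ [(k, 1)].
def pvRLEStep (runs : List (String × Int)) (k : String) : List (String × Int) :=
  match runs.getLast? with
  | some (q, c) => if q = k then runs.dropLast ++ [(q, c + 1)] else runs ++ [(k, 1)]
  | none => runs ++ [(k, 1)]

-- stage-2 loop body of Source B: state is (out, start); appends the span and advances start.
def pvSpanStep (st : List Int × Int) (r : String × Int) : List Int × Int :=
  (st.1 ++ [st.2, st.2 + r.2 - 1], st.2 + r.2)

def find_path_size_alt (path : List String) : List Int :=
  let pref := path.map (fun p => ((PySem.Str.split? p "_").getD []).headD "")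
  let runs := pref.foldl pvRLEStep []
  (runs.foldl pvSpanStep ([], 0)).1

-- ===== PRECONDITION & SPEC =====
-- On the empty list A returns [-1] (the unconditional trailing append of len-1), while B returns [],
-- the intended answer: no elements, no run boundaries.
def D_find_path_size (path : List String) : Prop := path = []
instance (path : List String) : Decidable (D_find_path_size path) := by unfold D_find_path_size; infer_instance

def Spec_find_path_size (path : List String) (out : List Int) : Prop := ¬ D_find_path_size path → out = find_path_size_alt path
instance (path : List String) (out : List Int) : Decidable (Spec_find_path_size path out) := by unfold Spec_find_path_size; infer_instance

def pvDiffWitness_find_path_size : List String := []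
def pvDiffWitnessOut_find_path_size : (List Int) × (List Int) := ([-1], [])

-- ===== CLAIM (what is proved, stated in full; the proofs are below) =====
def Claim_unchanged_find_path_size : Prop := ∀ (path : List String), Dom_find_path_size path → Spec_find_path_size path (find_path_size path)
def Claim_changed_find_path_size : Prop := Dom_find_path_size (pvDiffWitness_find_path_size) ∧ D_find_path_size (pvDiffWitness_find_path_size) ∧ find_path_size (pvDiffWitness_find_path_size) = pvDiffWitnessOut_find_path_size.1 ∧ find_path_size_alt (pvDiffWitness_find_path_size) = pvDiffWitnessOut_find_path_size.2 ∧ pvDiffWitnessOut_find_path_size.1 ≠ pvDiffWitnessOut_find_path_size.2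
def Claim_exact_find_path_size : Prop := ∀ (path : List String), Dom_find_path_size path → D_find_path_size path → find_path_size path ≠ find_path_size_alt path

-- ===== LEMMAS AND PROOFS =====

-- A's loop, characterised structurally: boundary pairs (i-1, i) at each change of prefix.
def pvRunA (i : Int) (arc : String) : List String → List Int
  | [] => []
  | p :: ps => if arc = p then pvRunA (i + 1) arc ps else (i - 1) :: i :: pvRunA (i + 1) p ps

-- B's stage 1, characterised structurally: run-length groups from a current group (q, c).
def pvRuns (q : String) (c : Int) : List String → List (String × Int)
  | [] => [(q, c)]
  | k :: ks => if q = k then pvRuns q (c + 1) ks else (q, c) :: pvRuns k 1 ks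

-- B's stage 2, characterised structurally: each group of length c spans [s, s + c - 1].
def pvSpans (s : Int) : List (String × Int) → List Int
  | [] => []
  | r :: rs => s :: (s + r.2 - 1) :: pvSpans (s + r.2) rs

-- the common shape: remaining output after the start marker of the current run, whose last
-- scanned element sits at index i.
def pvTail (i : Int) (x : String) : List String → List Int
  | [] => [i]
  | k :: ks => if x = k then pvTail (i + 1) x ks else i :: (i + 1) :: pvTail (i + 1) k ks

theorem pvFoldA (l : List String) : ∀ (i : Int) (acc : List Int) (arc : String), 1 ≤ i →
    (PySem.List.enumerate l i).foldl pvStepA (acc, some arc) = (acc ++ pvRunA i arc l, some (l.getLastD arc)) := by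
  induction l with
  | nil => intro i acc arc _; simp [PySem.List.enumerate_nil, pvRunA]
  | cons p ps ih =>
    intro i acc arc hi
    rw [PySem.List.enumerate_cons]
    simp only [List.foldl_cons]
    have hne : ¬ (i = 0) := by omega
    by_cases h : arc = p
    · have hst : pvStepA (acc, some arc) (i, p) = (acc, some p) := by
        simp [pvStepA, hne, h]
      rw [hst, ih (i+1) acc p (by omega)]
      subst h
      simp [pvRunA]
      cases ps <;> simp
    · have hst : pvStepA (acc, some arc) (i, p) = (acc ++ [i - 1, i], some p) := by
        simp [pvStepA, hne, h]
      rw [hst, ih (i+1) (acc ++ [i-1, i]) p (by omega)]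
      simp [pvRunA, h]
      cases ps <;> simp [List.getLast?_eq_some_getLast]

theorem pvFoldRLE (l : List String) : ∀ (acc : List (String × Int)) (q : String) (c : Int),
    l.foldl pvRLEStep (acc ++ [(q, c)]) = acc ++ pvRuns q c l := by
  induction l with
  | nil => intro acc q c; simp [pvRuns]
  | cons k ks ih =>
    intro acc q c
    simp only [List.foldl_cons]
    by_cases h : q = k
    · have hst : pvRLEStep (acc ++ [(q, c)]) k = acc ++ [(q, c + 1)] := by
        simp [pvRLEStep, h]
      rw [hst, ih acc q (c + 1)]
      simp [pvRuns, h]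
    · have hst : pvRLEStep (acc ++ [(q, c)]) k = (acc ++ [(q, c)]) ++ [(k, 1)] := by
        simp [pvRLEStep, h]
      rw [hst, ih (acc ++ [(q, c)]) k 1]
      simp [pvRuns, h]

theorem pvFoldSpan (runs : List (String × Int)) : ∀ (out : List Int) (s : Int),
    (runs.foldl pvSpanStep (out, s)).1 = out ++ pvSpans s runs := by
  induction runs with
  | nil => intro out s; simp [pvSpans]
  | cons r rs ih =>
    intro out s
    simp only [List.foldl_cons, pvSpanStep]
    rw [ih]
    simp [pvSpans]

theorem pvSpansRuns (l : List String) : ∀ (q : String) (c s : Int),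
    pvSpans s (pvRuns q c l) = s :: pvTail (s + c - 1) q l := by
  induction l with
  | nil => intro q c s; simp [pvRuns, pvSpans, pvTail]
  | cons k ks ih =>
    intro q c s
    by_cases h : q = k
    · simp only [pvRuns, if_pos h, pvTail]
      rw [ih q (c + 1) s, show s + (c + 1) - 1 = s + c - 1 + 1 by ring]
    · simp only [pvRuns, if_neg h, pvSpans, pvTail]
      rw [ih k 1 (s + c), show s + c + 1 - 1 = s + c by ring,
          show s + c - 1 + 1 = s + c by ring]

theorem pvTailRunA (l : List String) : ∀ (i : Int) (x : String),
    pvTail i x l = pvRunA (i + 1) x l ++ [i + l.length] := by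
  induction l with
  | nil => intro i x; simp [pvTail, pvRunA]
  | cons k ks ih =>
    intro i x
    have hl : (((k :: ks).length : Nat) : Int) = (ks.length : Int) + 1 := by
      push_cast [List.length_cons]; ring
    by_cases h : x = k
    · simp only [pvTail, if_pos h, pvRunA]
      rw [ih (i + 1) x, hl, show i + ((ks.length : Int) + 1) = i + 1 + ks.length by ring]
    · simp only [pvTail, if_neg h, pvRunA]
      rw [ih (i + 1) k, hl, show i + 1 - 1 = i by ring,
          show i + ((ks.length : Int) + 1) = i + 1 + ks.length by ring]
      simp

-- ===== VERDICT (by name: the statement is the Claim_ definition above) =====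
theorem find_path_size_spec : Claim_unchanged_find_path_size := by
  intro path _ hD
  unfold D_find_path_size at hD
  cases path with
  | nil => exact absurd rfl hD
  | cons x t =>
    unfold find_path_size find_path_size_alt
    simp only [List.map_cons]
    rw [PySem.List.enumerate_cons]
    simp only [List.foldl_cons]
    set fx := ((PySem.Str.split? x "_").getD []).headD "" with hfx
    set ft := t.map (fun p => ((PySem.Str.split? p "_").getD []).headD "") with hft
    rw [show pvStepA (([] : List Int), (none : Option String)) ((0 : Int), fx)
          = ([0], some fx) from by simp [pvStepA]]
    rw [show (0 : Int) + 1 = 1 from by ring]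
    rw [pvFoldA _ 1 [0] _ (le_refl 1)]
    rw [show pvRLEStep ([] : List (String × Int)) fx = [] ++ [(fx, 1)] from by simp [pvRLEStep]]
    rw [pvFoldRLE ft [] fx 1, List.nil_append, pvFoldSpan (pvRuns fx 1 ft) [] 0, List.nil_append]
    rw [pvSpansRuns ft fx 1 0]
    rw [show (0 : Int) + 1 - 1 = 0 from by ring]
    rw [pvTailRunA ft 0 fx]
    rw [show (0 : Int) + 1 = 1 from by ring]
    push_cast [List.length_cons, List.length_map]
    simp

theorem find_path_size_changed : Claim_changed_find_path_size := by
  unfold Claim_changed_find_path_size; decide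

theorem find_path_size_tight : Claim_exact_find_path_size := by
  intro path _ hD
  unfold D_find_path_size at hD
  subst hD
  decide
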